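-- pv_equiv track=rewrite | github.com/ReverseDir/Video | Python_get_youtube_video_info.py | clamp_array
-- ===== SOURCE A (Python) =====
-- def clamp_array(array = [], max_len = 10):
--     "Ограничевает массив делая длину менее чем"
--     all_len = 0
--     for i in range(len(array)):
--         if(all_len > max_len):
--             array.pop()
--             continue
--         all_len += len(array[i])
--     return array
-- ===== SOURCE B (Python) =====
-- def clamp_array(array = [], max_len = 10):
--     "Ограничевает массив делая длину менее чем"
--     # prefix sums of element lengths: sums[j] = len of first j elements' total
--     sums = [0]
--     for x in array:
--         sums.append(sums[-1] + len(x))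
--     # binary search: first index whose prefix sum exceeds max_len (bisect_right)
--     lo, hi = 0, len(sums)
--     while lo < hi:
--         mid = (lo + hi) // 2
--         if sums[mid] <= max_len:
--             lo = mid + 1
--         else:
--             hi = mid
--     keep = min(lo, len(array))
--     del array[keep:]
--     return array
-- ===== Notes on version B (the rewrite author's own statement) =====
-- stated objective: alternative
-- what changed: Replaces the index loop that pops one trailing element per remaining iteration after the length budget is crossed by a prefix-sum table plus a binary search for the cutoff index, followed by one truncation.
import Mathlib
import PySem

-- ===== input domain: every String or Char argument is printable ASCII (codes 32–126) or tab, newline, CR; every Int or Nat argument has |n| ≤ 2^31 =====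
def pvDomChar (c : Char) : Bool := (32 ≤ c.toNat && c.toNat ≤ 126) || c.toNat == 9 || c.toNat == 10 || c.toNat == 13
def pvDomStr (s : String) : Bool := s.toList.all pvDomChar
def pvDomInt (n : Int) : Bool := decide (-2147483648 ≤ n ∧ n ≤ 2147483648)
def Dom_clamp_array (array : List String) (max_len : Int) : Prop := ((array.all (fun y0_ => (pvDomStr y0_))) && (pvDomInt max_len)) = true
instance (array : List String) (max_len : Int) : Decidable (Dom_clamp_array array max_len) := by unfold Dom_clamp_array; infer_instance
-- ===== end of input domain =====

-- B replaces A's pop-per-iteration index loop by a prefix-sum table, a binary search for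
-- the cutoff, and one truncation (equal return values; both A and B mutate the list in
-- place in Python, returning the same list object).

-- ===== PORT A =====
-- for i in range(len(array)): mutable state (array, all_len).  array.pop() is modelled by
-- dropLast and array[i] by pyGet?; in Python both are always in range here (pops start only
-- after the budget is crossed, one per remaining index), so the .getD defaults are unreachable.
def clamp_array (array : List String) (max_len : Int) : List String :=
  ((PySem.List.pyRange 0 (array.length : Int) 1).foldl
    (fun (st : List String × Int) i =>
      if st.2 > max_len then (st.1.dropLast, st.2)
      else (st.1, st.2 + PySem.Str.len ((PySem.List.pyGet? st.1 i).getD "")))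
    (array, 0)).1

-- ===== PORT B =====
-- termination of the binary search: the midpoint lies in [lo, hi)
theorem pv_mid_bounds (lo hi : Int) (h : lo < hi) :
    lo ≤ PySem.Int.floordiv (lo + hi) 2 ∧ PySem.Int.floordiv (lo + hi) 2 < hi := by
  simp only [PySem.Int.floordiv, Int.fdiv_eq_ediv]
  omega

-- the while lo < hi loop of Source B; sums[mid] is in range whenever 0 ≤ lo ≤ hi ≤ len sums
def clamp_array_alt_bsearch (sums : List Int) (max_len : Int) (lo hi : Int) : Int :=
  if h : lo < hi then
    let mid := PySem.Int.floordiv (lo + hi) 2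
    if (PySem.List.pyGet? sums mid).getD 0 ≤ max_len then
      clamp_array_alt_bsearch sums max_len (mid + 1) hi
    else
      clamp_array_alt_bsearch sums max_len lo mid
  else lo
termination_by (hi - lo).toNat
decreasing_by
  · have := pv_mid_bounds lo hi h
    omega
  · have := pv_mid_bounds lo hi h
    omega

def clamp_array_alt (array : List String) (max_len : Int) : List String :=
  -- sums[-1] via pyGet?; the list starts [0] and only grows, so the .getD default is unreachable
  let sums := array.foldl
    (fun (s : List Int) x => s ++ [(PySem.List.pyGet? s (-1)).getD 0 + PySem.Str.len x]) [0]
  let lo := clamp_array_alt_bsearch sums max_len 0 (sums.length : Int)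
  let keep := min lo (array.length : Int)
  PySem.List.slice array none (some keep)   -- del array[keep:]

-- ===== PRECONDITION & SPEC =====
def Spec_clamp_array (array : List String) (max_len : Int) (out : List String) : Prop := out = clamp_array_alt array max_len
instance (array : List String) (max_len : Int) (out : List String) : Decidable (Spec_clamp_array array max_len out) := by unfold Spec_clamp_array; infer_instance

-- ===== CLAIM (what is proved, stated in full; the proofs are below) =====
def Claim_equal_clamp_array : Prop := ∀ (array : List String) (max_len : Int), Dom_clamp_array array max_len → Spec_clamp_array array max_len (clamp_array array max_len)

-- ===== LEMMAS AND PROOFS =====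

-- total length of the first j elements
def pvLsum (xs : List String) (j : Nat) : Int := ((xs.take j).map PySem.Str.len).sum

-- number of elements the Python programs keep
def pvKeep (xs : List String) (m : Int) : Nat :=
  match xs with
  | [] => 0
  | x :: r => if m < 0 then 0 else pvKeep r (m - PySem.Str.len x) + 1

theorem pv_len_nonneg (s : String) : 0 ≤ PySem.Str.len s := by
  simp [PySem.Str.len_eq]

theorem pvKeep_le (xs : List String) (m : Int) : pvKeep xs m ≤ xs.length := by
  induction xs generalizing m with
  | nil => simp [pvKeep]
  | cons x r ih =>
    simp only [pvKeep, List.length_cons]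
    split
    · omega
    · have := ih (m - PySem.Str.len x); omega

theorem pvLsum_zero (xs : List String) : pvLsum xs 0 = 0 := by simp [pvLsum]

theorem pvLsum_cons_succ (x : String) (r : List String) (j : Nat) :
    pvLsum (x :: r) (j + 1) = PySem.Str.len x + pvLsum r j := by
  simp [pvLsum]

theorem pvLsum_succ (xs : List String) (j : Nat) (hj : j < xs.length) :
    pvLsum xs (j + 1) = pvLsum xs j + PySem.Str.len xs[j] := by
  simp only [pvLsum, List.take_add_one, List.getElem?_eq_getElem hj, Option.toList_some,
    List.map_append, List.sum_append, List.map_cons, List.map_nil, List.sum_cons, List.sum_nil]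
  ring

theorem pvLsum_mono (xs : List String) (i j : Nat) (h : i ≤ j) :
    pvLsum xs i ≤ pvLsum xs j := by
  have hsplit : xs.take j = (xs.take j).take i ++ (xs.take j).drop i :=
    (List.take_append_drop i (xs.take j)).symm
  have : pvLsum xs j = pvLsum xs i + (((xs.take j).drop i).map PySem.Str.len).sum := by
    simp only [pvLsum]
    conv_lhs => rw [hsplit]
    rw [List.map_append, List.sum_append, List.take_take]
    simp [Nat.min_eq_left h]
  rw [this]
  have hnn : 0 ≤ (((xs.take j).drop i).map PySem.Str.len).sum := by
    apply List.sum_nonneg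
    intro a ha
    simp only [List.mem_map] at ha
    obtain ⟨s, _, rfl⟩ := ha
    exact pv_len_nonneg s
  omega

theorem pvKeep_lt_le (xs : List String) (m : Int) (j : Nat) (h : j < pvKeep xs m) :
    pvLsum xs j ≤ m := by
  induction xs generalizing m j with
  | nil => simp [pvKeep] at h
  | cons x r ih =>
    simp only [pvKeep] at h
    split at h
    · omega
    · rename_i hm
      cases j with
      | zero => simp [pvLsum_zero]; omega
      | succ j' =>
        rw [pvLsum_cons_succ]
        have := ih (m - PySem.Str.len x) j' (by omega)
        omega

theorem pvKeep_lt_gt (xs : List String) (m : Int) (h : pvKeep xs m < xs.length) :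
    m < pvLsum xs (pvKeep xs m) := by
  induction xs generalizing m with
  | nil => simp at h
  | cons x r ih =>
    simp only [pvKeep, List.length_cons] at h ⊢
    by_cases hm : m < 0
    · rw [if_pos hm]; simp [pvLsum_zero]; omega
    · rw [if_neg hm] at h ⊢
      rw [pvLsum_cons_succ]
      have := ih (m - PySem.Str.len x) (by omega)
      omega

theorem pv_dropLast_take (xs : List String) (t : Nat) (ht : t ≤ xs.length) :
    (xs.take t).dropLast = xs.take (t - 1) := by
  rw [List.dropLast_eq_take, List.take_take, List.length_take]
  congr 1
  omega

-- closed form of A's fold after the first j iterations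
theorem pv_A_fold (array : List String) (m : Int) (j : Nat) (hj : j ≤ array.length) :
    (PySem.List.pyRange 0 (j : Int) 1).foldl
      (fun (st : List String × Int) i =>
        if st.2 > m then (st.1.dropLast, st.2)
        else (st.1, st.2 + PySem.Str.len ((PySem.List.pyGet? st.1 i).getD "")))
      (array, 0) =
    if j ≤ pvKeep array m then (array, pvLsum array j)
    else (array.take (array.length - (j - pvKeep array m)), pvLsum array (pvKeep array m)) := by
  induction j with
  | zero =>
    simp [PySem.List.pyRange_one_eq_nil, pvLsum_zero]
  | succ j ihj =>
    have hj' : j ≤ array.length := by omega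
    have hcast : ((j + 1 : Nat) : Int) = (j : Int) + 1 := by push_cast; ring
    rw [hcast, PySem.List.pyRange_one_succ_right (by positivity), List.foldl_append,
        ihj hj']
    simp only [List.foldl_cons, List.foldl_nil]
    set k := pvKeep array m with hk
    have hkle : k ≤ array.length := pvKeep_le array m
    by_cases h1 : j < k
    · -- before the crossing: accumulate
      have hle : pvLsum array j ≤ m := pvKeep_lt_le array m j h1
      have hjlen : j < array.length := by omega
      rw [if_pos (show j ≤ k by omega)]
      rw [if_neg (show ¬ ((array, pvLsum array j) : List String × Int).2 > m by simpa using by omega)]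
      rw [if_pos (show j + 1 ≤ k by omega)]
      simp only
      rw [PySem.List.pyGet?_natCast, List.getElem?_eq_getElem hjlen]
      simp [pvLsum_succ array j hjlen]
    · -- at or after the crossing: pop
      have hkn : k < array.length := by omega
      have hgt : m < pvLsum array k := pvKeep_lt_gt array m hkn
      by_cases h2 : j = k
      · rw [if_pos (show j ≤ k by omega)]
        rw [if_pos (show ((array, pvLsum array j) : List String × Int).2 > m by
          simp only; rw [h2]; omega)]
        rw [if_neg (show ¬ j + 1 ≤ k by omega)]
        simp only
        rw [List.dropLast_eq_take]
        have he : array.length - 1 = array.length - (j + 1 - k) := by omega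
        rw [he, h2]
      · have h3 : k < j := by omega
        rw [if_neg (show ¬ j ≤ k by omega)]
        rw [if_pos (show ((array.take (array.length - (j - k)), pvLsum array k) : List String × Int).2 > m by
          simp only; omega)]
        rw [if_neg (show ¬ j + 1 ≤ k by omega)]
        simp only
        rw [pv_dropLast_take array _ (by omega)]
        have he : array.length - (j - k) - 1 = array.length - (j + 1 - k) := by omega
        rw [he]

theorem pv_A_eq (array : List String) (m : Int) :
    clamp_array array m = array.take (pvKeep array m) := by
  unfold clamp_array
  rw [pv_A_fold array m array.length (le_refl _)]
  have hkle := pvKeep_le array m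
  by_cases h : array.length ≤ pvKeep array m
  · rw [if_pos h]
    have : pvKeep array m = array.length := by omega
    simp [this]
  · rw [if_neg h]
    have he : array.length - (array.length - pvKeep array m) = pvKeep array m := by omega
    rw [he]

-- the prefix-sum list built by B's first loop
theorem pv_sums_fold (xs : List String) :
    ∀ (acc : List Int) (c : Int),
      xs.foldl
        (fun (s : List Int) x => s ++ [(PySem.List.pyGet? s (-1)).getD 0 + PySem.Str.len x])
        (acc ++ [c]) =
      acc ++ (List.range (xs.length + 1)).map (fun j => c + pvLsum xs j) := by
  induction xs with
  | nil => intro acc c; simp [pvLsum_zero]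
  | cons x r ih =>
    intro acc c
    simp only [List.foldl_cons, PySem.List.pyGet?_neg_one_append_singleton, Option.getD_some]
    rw [ih (acc ++ [c]) (c + PySem.Str.len x)]
    rw [List.length_cons, List.range_succ_eq_map, List.range_succ_eq_map]
    simp only [List.map_cons, List.map_map, List.append_assoc, List.cons_append,
      Function.comp_def]
    simp only [pvLsum_zero, pvLsum_cons_succ, add_assoc]
    rw [List.range_succ_eq_map]
    simp [pvLsum_zero, Function.comp_def]

theorem pv_sums_eq (xs : List String) :
    xs.foldl
      (fun (s : List Int) x => s ++ [(PySem.List.pyGet? s (-1)).getD 0 + PySem.Str.len x])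
      [0] =
    (List.range (xs.length + 1)).map (fun j => pvLsum xs j) := by
  have := pv_sums_fold xs [] 0
  simpa using this

-- characterisation of the binary search
theorem pv_bsearch_char (s : List Int) (m : Int) :
    ∀ (d : Nat) (lo hi : Int), (hi - lo).toNat ≤ d → 0 ≤ lo → lo ≤ hi → hi ≤ s.length →
    (∀ j : Nat, (j : Int) < lo → s.getD j 0 ≤ m) →
    (∀ j : Nat, hi ≤ (j : Int) → j < s.length → m < s.getD j 0) →
    (∀ i j : Nat, i ≤ j → j < s.length → s.getD i 0 ≤ s.getD j 0) →
    lo ≤ clamp_array_alt_bsearch s m lo hi ∧ clamp_array_alt_bsearch s m lo hi ≤ hi ∧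
    (∀ j : Nat, (j : Int) < clamp_array_alt_bsearch s m lo hi → s.getD j 0 ≤ m) ∧
    (∀ j : Nat, clamp_array_alt_bsearch s m lo hi ≤ (j : Int) → j < s.length → m < s.getD j 0) := by
  intro d
  induction d with
  | zero =>
    intro lo hi hd h0 hlh hhl Hlo Hhi _
    have : hi = lo := by omega
    subst this
    rw [clamp_array_alt_bsearch, dif_neg (by omega)]
    exact ⟨le_refl _, le_refl _, Hlo, Hhi⟩
  | succ d ihd =>
    intro lo hi hd h0 hlh hhl Hlo Hhi Hmono
    by_cases h : lo < hi
    · have hmid := pv_mid_bounds lo hi h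
      set mid := PySem.Int.floordiv (lo + hi) 2 with hmiddef
      have hmid0 : 0 ≤ mid := by omega
      have hmidlen : mid < (s.length : Int) := by omega
      have hgetmid : (PySem.List.pyGet? s mid).getD 0 = s.getD mid.toNat 0 := by
        rw [PySem.List.pyGet?_of_nonneg s hmid0, List.getD_eq_getElem?_getD]
      rw [clamp_array_alt_bsearch, dif_pos h]
      simp only [← hmiddef, hgetmid]
      by_cases hc : s.getD mid.toNat 0 ≤ m
      · rw [if_pos hc]
        have Hlo' : ∀ j : Nat, (j : Int) < mid + 1 → s.getD j 0 ≤ m := by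
          intro j hjm
          have h1 : j ≤ mid.toNat := by omega
          have h2 : mid.toNat < s.length := by omega
          exact le_trans (Hmono j mid.toNat h1 h2) hc
        have hres := ihd (mid + 1) hi (by omega) (by omega) (by omega) hhl Hlo' Hhi Hmono
        exact ⟨by omega, hres.2.1, hres.2.2.1, hres.2.2.2⟩
      · rw [if_neg hc]
        have Hhi' : ∀ j : Nat, mid ≤ (j : Int) → j < s.length → m < s.getD j 0 := by
          intro j hjm hjlen
          have h2 : mid.toNat < s.length := by omega
          have := Hmono mid.toNat j (by omega) hjlen
          omega
        have := ihd lo mid (by omega) h0 (by omega) (by omega) Hlo Hhi' Hmono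
        exact ⟨this.1, by omega, this.2.2.1, this.2.2.2⟩
    · rw [clamp_array_alt_bsearch, dif_neg h]
      have : hi = lo := by omega
      subst this
      exact ⟨le_refl _, le_refl _, Hlo, Hhi⟩

theorem pv_B_eq (array : List String) (m : Int) :
    clamp_array_alt array m = array.take (pvKeep array m) := by
  unfold clamp_array_alt
  dsimp only
  rw [pv_sums_eq]
  set n := array.length with hn
  set s := (List.range (n + 1)).map (fun j => pvLsum array j) with hs
  have hslen : s.length = n + 1 := by simp [hs]
  have hgetD : ∀ j : Nat, j < n + 1 → s.getD j 0 = pvLsum array j := by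
    intro j hj
    rw [hs, List.getD_eq_getElem?_getD]
    simp [List.getElem?_map, List.getElem?_range hj]
  have Hmono : ∀ i j : Nat, i ≤ j → j < s.length → s.getD i 0 ≤ s.getD j 0 := by
    intro i j hij hjlen
    rw [hslen] at hjlen
    rw [hgetD i (by omega), hgetD j hjlen]
    exact pvLsum_mono array i j hij
  have hchar := pv_bsearch_char s m (n + 1) 0 (s.length : Int) (by rw [hslen]; omega)
    (le_refl _) (by positivity) (by omega)
    (by intro j hj; omega)
    (by intro j hj hjlen; exact absurd hjlen (by omega))
    Hmono
  set r := clamp_array_alt_bsearch s m 0 (s.length : Int) with hr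
  obtain ⟨hr0, hrhi, Hlow, Hhigh⟩ := hchar
  rw [hslen] at hrhi
  set k := pvKeep array m with hk
  have hkle : k ≤ n := pvKeep_le array m
  have hkeep : min r (n : Int) = (k : Int) := by
    have hknotlt : ¬ ((k : Int) < min r (n : Int)) := by
      intro hlt
      have hkr : (k : Int) < r := by omega
      have hkn : k < n := by omega
      have h1 : m < pvLsum array k := pvKeep_lt_gt array m (by omega)
      have h2 := Hlow k hkr
      rw [hgetD k (by omega)] at h2
      omega
    have hknotgt : ¬ (min r (n : Int) < (k : Int)) := by
      intro hlt
      have hrk : r < (k : Int) ∨ (n : Int) < (k : Int) := by omega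
      rcases hrk with hrk | hrk
      · have hrnat : r = (r.toNat : Int) := by omega
        have h1 := pvKeep_lt_le array m r.toNat (by omega)
        have h2 := Hhigh r.toNat (by omega) (by omega)
        rw [hgetD r.toNat (by omega)] at h2
        omega
      · omega
    omega
  rw [hkeep]
  rw [PySem.List.slice_to_natCast]

-- ===== VERDICT (by name: the statement is the Claim_ definition above) =====
theorem clamp_array_spec : Claim_equal_clamp_array := by
  intro array max_len _
  unfold Spec_clamp_array
  exact (pv_A_eq array max_len).trans (pv_B_eq array max_len).symm
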